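-- pv_equiv track=rewrite | github.com/Shubham92166/Data-Structures-and-Algorithm | Bit Manipulation/interestingArray.py | solve
-- ===== SOURCE A (Python) =====
-- def solve(A):
--     xor = 0
--     for i in A:
--         xor ^= i
--     if xor % 2 == 0:
--         return "Yes"
--     else:
--         return "No"
-- ===== SOURCE B (Python) =====
-- def solve(A):
--     # Divide-and-conquer: the parity of the XOR of A equals the XOR of the
--     # parities of the two halves; a one-element range contributes its low bit.
--     def odd_parity(lo, hi):
--         if hi - lo == 0:
--             return 0
--         if hi - lo == 1:
--             return A[lo] & 1
--         mid = (lo + hi) // 2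
--         return odd_parity(lo, mid) ^ odd_parity(mid, hi)
--     return "Yes" if odd_parity(0, len(A)) == 0 else "No"
-- ===== Notes on version B (the rewrite author's own statement) =====
-- stated objective: alternative
-- what changed: B replaces A's left-to-right XOR accumulator by a recursive divide-and-conquer over index ranges: it splits the range in half, computes each half's odd-count parity bit and combines them with ^, with a one-element range contributing its low bit; no running accumulator or full XOR is ever built.
import Mathlib
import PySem

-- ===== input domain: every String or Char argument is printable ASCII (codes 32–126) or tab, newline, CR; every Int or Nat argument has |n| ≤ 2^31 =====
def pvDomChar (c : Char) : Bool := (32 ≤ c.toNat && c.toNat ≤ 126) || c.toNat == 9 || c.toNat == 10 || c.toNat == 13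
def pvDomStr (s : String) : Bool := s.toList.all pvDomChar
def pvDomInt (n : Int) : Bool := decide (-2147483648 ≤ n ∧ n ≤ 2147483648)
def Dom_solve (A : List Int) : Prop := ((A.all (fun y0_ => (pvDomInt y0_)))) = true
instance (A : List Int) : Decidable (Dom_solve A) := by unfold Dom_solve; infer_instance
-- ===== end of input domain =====

-- B replaces A's linear XOR accumulation by a recursive divide-and-conquer over
-- index ranges combining sub-parities with ^; same O(n) cost, different decomposition.

-- ===== PORT A =====
def solve (A : List Int) : String :=
  let xor := A.foldl (fun x i => PySem.Int.bxor x i) 0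
  if PySem.Int.mod xor 2 = 0 then "Yes" else "No"

-- ===== PORT B =====
-- odd_parity(lo, hi) of Source B; A[lo] is only reached with lo < len(A), where
-- pyGet? returns some, so the .getD 0 default is never used.
def oddParity (A : List Int) (lo hi : Nat) : Int :=
  if hi - lo = 0 then 0
  else if hi - lo = 1 then PySem.Int.band ((PySem.List.pyGet? A (lo : Int)).getD 0) 1
  else
    PySem.Int.bxor (oddParity A lo ((lo + hi) / 2)) (oddParity A ((lo + hi) / 2) hi)
termination_by hi - lo
decreasing_by all_goals omega

def solve_alt (A : List Int) : String :=
  if oddParity A 0 A.length = 0 then "Yes" else "No"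

-- ===== PRECONDITION & SPEC =====
def Spec_solve (A : List Int) (out : String) : Prop := out = solve_alt A
instance (A : List Int) (out : String) : Decidable (Spec_solve A out) := by unfold Spec_solve; infer_instance

-- ===== CLAIM (what is proved, stated in full; the proofs are below) =====
def Claim_equal_solve : Prop := ∀ (A : List Int), Dom_solve A → Spec_solve A (solve A)

-- ===== LEMMAS AND PROOFS =====

theorem pv_mod2_eq (a : Int) : PySem.Int.mod a 2 = a % 2 := by
  unfold PySem.Int.mod
  simp [Int.fmod_eq_emod]

theorem pv_natXor_parity (m n : Nat) : ((m ^^^ n : Nat) : Int) % 2 = ((m : Int) + n) % 2 := by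
  have := @Nat.xor_mod_two_eq m n
  omega

theorem pv_bxor_parity (a b : Int) : (PySem.Int.bxor a b) % 2 = (a + b) % 2 := by
  unfold PySem.Int.bxor
  split_ifs with h1 h2 h2 <;>
  · first
    | (have := pv_natXor_parity a.toNat b.toNat; omega)
    | (have := pv_natXor_parity a.toNat (-b - 1).toNat; omega)
    | (have := pv_natXor_parity (-a - 1).toNat b.toNat; omega)
    | (have := pv_natXor_parity (-a - 1).toNat (-b - 1).toNat; omega)

theorem pv_foldl_parity (A : List Int) (x : Int) :
    (A.foldl (fun x i => PySem.Int.bxor x i) x) % 2 = (x + A.sum) % 2 := by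
  induction A generalizing x with
  | nil => simp
  | cons a t ih =>
    simp only [List.foldl_cons, List.sum_cons]
    rw [ih]
    have := pv_bxor_parity x a
    omega

theorem pv_bxor_bits (a b : Int) (ha : 0 ≤ a) (ha2 : a < 2) (hb : 0 ≤ b) (hb2 : b < 2) :
    PySem.Int.bxor a b = (a + b) % 2 := by
  interval_cases a <;> interval_cases b <;> decide

theorem pv_oddParity_eq (A : List Int) (lo hi : Nat) (hhi : hi ≤ A.length) :
    oddParity A lo hi = ((A.drop lo).take (hi - lo)).sum % 2 := by
  induction lo, hi using oddParity.induct with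
  | case1 lo hi h0 =>
    rw [oddParity]
    simp [h0]
  | case2 lo hi h0 h1 =>
    rw [oddParity]
    simp only [h1]
    have hlt : lo < A.length := by omega
    rw [PySem.Int.band_one, pv_mod2_eq]
    rw [PySem.List.pyGet?_natCast]
    rw [List.getElem?_eq_getElem hlt]
    have ht : (A.drop lo).take 1 = [A[lo]] := by
      rw [List.take_one]
      simp [List.head?_drop, List.getElem?_eq_getElem hlt]
    simp [ht]
  | case3 lo hi h0 h1 ih1 ih2 =>
    rw [oddParity]
    simp only [h0, h1, if_false]
    have hmid1 : lo < (lo + hi) / 2 := by omega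
    have hmid2 : (lo + hi) / 2 < hi := by omega
    rw [ih1 (by omega), ih2 (by omega)]
    have hsplit : (A.drop lo).take (hi - lo)
        = (A.drop lo).take ((lo + hi) / 2 - lo) ++ (A.drop ((lo + hi) / 2)).take (hi - (lo + hi) / 2) := by
      have h : hi - lo = ((lo + hi) / 2 - lo) + (hi - (lo + hi) / 2) := by omega
      have hd : (A.drop lo).drop ((lo + hi) / 2 - lo) = A.drop ((lo + hi) / 2) := by
        rw [List.drop_drop]
        congr 1
        omega
      rw [h, List.take_add, hd]
    rw [pv_bxor_bits _ _ (Int.emod_nonneg _ (by norm_num)) (Int.emod_lt_of_pos _ (by norm_num))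
        (Int.emod_nonneg _ (by norm_num)) (Int.emod_lt_of_pos _ (by norm_num))]
    rw [hsplit, List.sum_append]
    omega

-- ===== VERDICT (by name: the statement is the Claim_ definition above) =====
theorem solve_spec : Claim_equal_solve := by
  intro A _
  unfold Spec_solve solve solve_alt
  have h1 := pv_foldl_parity A 0
  have h2 := pv_oddParity_eq A 0 A.length (le_refl _)
  simp only [Nat.sub_zero, List.drop_zero, List.take_length] at h2
  simp only [pv_mod2_eq, h2]
  have hc : ((A.foldl (fun x i => PySem.Int.bxor x i) 0) % 2 = 0) ↔ (A.sum % 2 = 0) := by omega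
  simp [hc]
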